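-- pv_equiv track=rewrite | github.com/AxFoundation/strax | tests/test_hitlet.py | _count_zle_samples
-- ===== SOURCE A (Python) =====
-- def _count_zle_samples(data):
--     """Function which returns number of ZLE samples."""
--     data = data[::-1]
--     ZLE = True
--     i = 0
--     while ZLE:
--         if (not data[i] == 0) or (i == len(data)):
--             break
--         i += 1
--     return i
-- ===== SOURCE B (Python) =====
-- def _count_zle_samples(data):
--     """Function which returns number of ZLE samples."""
--     last = None
--     for i, x in enumerate(data):
--         if x != 0:
--             last = i
--     return len(data) - 1 - last
-- ===== Notes on version B (the rewrite author's own statement) =====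
-- stated objective: alternative
-- what changed: B makes a single forward pass remembering the index of the last nonzero sample and returns len(data)-1-last, instead of A's reverse-the-list-then-scan while loop; both raise on all-zero/empty input (excluded by Pre_).
import Mathlib
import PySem

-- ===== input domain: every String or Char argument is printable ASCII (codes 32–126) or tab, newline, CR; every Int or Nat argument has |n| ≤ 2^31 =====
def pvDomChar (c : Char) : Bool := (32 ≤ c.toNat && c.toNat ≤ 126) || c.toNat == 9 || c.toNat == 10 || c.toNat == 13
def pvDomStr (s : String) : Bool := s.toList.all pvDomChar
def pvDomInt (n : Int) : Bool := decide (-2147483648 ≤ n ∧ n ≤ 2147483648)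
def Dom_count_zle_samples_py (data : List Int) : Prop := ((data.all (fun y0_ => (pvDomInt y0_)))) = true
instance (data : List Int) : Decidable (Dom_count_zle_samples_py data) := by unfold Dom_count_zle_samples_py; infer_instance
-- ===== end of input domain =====

-- ===== PORT A =====
-- A reverses the list (data[::-1]) and scans with a while loop until a nonzero sample;
-- the while loop becomes the obvious structural recursion over the remaining reversed list.
def pyLoopA : List Int → Int → Int
  | [], i => i          -- Python raises IndexError here (all samples consumed); excluded by Pre_
  | x :: rest, i => if ¬ (x = 0) then i else pyLoopA rest (i + 1)

def count_zle_samples_py (data : List Int) : Int :=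
  pyLoopA ((PySem.List.slice? data none none (-1)).getD []) 0

-- ===== PORT B =====
-- B: one forward pass with enumerate, remembering the last nonzero index.
def lastNZ (data : List Int) : Option Int :=
  (PySem.List.enumerate data).foldl
    (fun acc p => if ¬ (p.2 = 0) then some p.1 else acc) none

def count_zle_samples_py_alt (data : List Int) : Int :=
  match lastNZ data with
  | some j => (data.length : Int) - 1 - j
  | none => 0          -- Python raises TypeError (int - None) here; excluded by Pre_

-- ===== PRECONDITION & SPEC =====
-- Pre_ excludes exactly the inputs where A raises IndexError (no nonzero sample, incl. []);
-- B raises TypeError there.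
def Pre_count_zle_samples_py (data : List Int) : Prop := ∃ x ∈ data, x ≠ 0
instance (data : List Int) : Decidable (Pre_count_zle_samples_py data) := by unfold Pre_count_zle_samples_py; infer_instance
def pvWitness_count_zle_samples_py : List Int := [1, 0]

def Spec_count_zle_samples_py (data : List Int) (out : Int) : Prop := out = count_zle_samples_py_alt data
instance (data : List Int) (out : Int) : Decidable (Spec_count_zle_samples_py data out) := by unfold Spec_count_zle_samples_py; infer_instance

-- ===== CLAIM (what is proved, stated in full; the proofs are below) =====
def Claim_equal_count_zle_samples_py : Prop := ∀ (data : List Int), Dom_count_zle_samples_py data → Pre_count_zle_samples_py data → Spec_count_zle_samples_py data (count_zle_samples_py data)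

-- ===== LEMMAS AND PROOFS =====

theorem pyLoopA_shift (l : List Int) (i : Int) : pyLoopA l i = i + pyLoopA l 0 := by
  induction l generalizing i with
  | nil => simp [pyLoopA]
  | cons x rest ih =>
    by_cases hx : x = 0
    · simp only [pyLoopA, hx]
      simp only [not_true, if_false]
      rw [ih (i + 1), ih (0 + 1)]
      ring
    · simp [pyLoopA, hx]

theorem lastNZ_acc_some (l : List Int) (s : Int) (j : Int) :
    ((PySem.List.enumerate l s).foldl
      (fun acc p => if ¬ (p.2 = 0) then some p.1 else acc) (some j)).isSome := by
  induction l generalizing s j with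
  | nil => simp [PySem.List.enumerate_nil]
  | cons x rest ih =>
    rw [PySem.List.enumerate_cons]
    simp only [List.foldl]
    by_cases hx : x = 0
    · simpa [hx] using ih (s + 1) j
    · simpa [hx] using ih (s + 1) s

theorem lastNZ_some_of_mem (l : List Int) (s : Int) (hx : ∃ x ∈ l, x ≠ 0) :
    ∃ j, (PySem.List.enumerate l s).foldl
      (fun acc p => if ¬ (p.2 = 0) then some p.1 else acc) none = some j := by
  induction l generalizing s with
  | nil => simp at hx
  | cons x rest ih =>
    rw [PySem.List.enumerate_cons]
    by_cases h : x = 0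
    · simp only [List.foldl, h, not_true, if_false]
      apply ih
      rcases hx with ⟨y, hy, hny⟩
      rcases List.mem_cons.mp hy with rfl | hy
      · exact absurd h hny
      · exact ⟨y, hy, hny⟩
    · simp only [List.foldl, h, not_false_iff, if_true]
      have := lastNZ_acc_some rest (s + 1) s
      rcases hj : (PySem.List.enumerate rest (s + 1)).foldl
          (fun acc p => if ¬ (p.2 = 0) then some p.1 else acc) (some s) with _ | j
      · rw [hj] at this; simp at this
      · exact ⟨j, hj⟩

theorem main_lemma (data : List Int) (hx : ∃ x ∈ data, x ≠ 0) :
    pyLoopA data.reverse 0 = count_zle_samples_py_alt data := by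
  induction data using List.reverseRecOn with
  | nil => simp at hx
  | append_singleton l x ih =>
    rw [List.reverse_append]
    simp only [List.reverse_singleton, List.singleton_append]
    by_cases h : x = 0
    · subst h
      simp only [pyLoopA, not_true, if_false]
      rw [pyLoopA_shift]
      have hl : ∃ y ∈ l, y ≠ 0 := by
        rcases hx with ⟨y, hy, hny⟩
        rcases List.mem_append.mp hy with hy | hy
        · exact ⟨y, hy, hny⟩
        · simp at hy; exact absurd hy hny
      rw [ih hl]
      unfold count_zle_samples_py_alt lastNZ
      rw [PySem.List.enumerate_append]
      rcases lastNZ_some_of_mem l 0 hl with ⟨j, hj⟩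
      rw [List.foldl_append, hj]
      simp [PySem.List.enumerate_cons, PySem.List.enumerate_nil, List.foldl]
      ring
    · simp only [pyLoopA, h, not_false_iff, if_true]
      unfold count_zle_samples_py_alt lastNZ
      rw [PySem.List.enumerate_append, List.foldl_append]
      simp [PySem.List.enumerate_cons, PySem.List.enumerate_nil, List.foldl, h]

-- ===== VERDICT (by name: the statement is the Claim_ definition above) =====
theorem count_zle_samples_py_spec : Claim_equal_count_zle_samples_py := by
  intro data _ hpre
  unfold Spec_count_zle_samples_py count_zle_samples_py
  rw [PySem.List.slice?_none_none_neg_one]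
  exact main_lemma data hpre
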